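-- pv_equiv track=rewrite | github.com/philippTheCat/pyggel | pyggel/data.py | _get_next_biggest
-- ===== SOURCE A (Python) =====
-- def _get_next_biggest(x, y):
--     """Get the next biggest power of two x and y sizes"""
--     if x == y == 1:
--         return x, y
--     nw = 16
--     nh = 16
--     while nw < x:
--         nw *= 2
--     while nh < y:
--         nh *= 2
--     return nw, nh
-- ===== SOURCE B (Python) =====
-- def _get_next_biggest(x, y):
--     """Get the next biggest power of two x and y sizes"""
--     if x == y == 1:
--         return x, y
--     def pot(v):
--         return 16 if v <= 16 else 1 << (v - 1).bit_length()
--     return pot(x), pot(y)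
-- ===== Notes on version B (the rewrite author's own statement) =====
-- stated objective: alternative
-- what changed: Replaces the two doubling while-loops with a closed-form bit-length formula (1 << (v-1).bit_length(), floored at 16) per dimension.
import Mathlib
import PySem

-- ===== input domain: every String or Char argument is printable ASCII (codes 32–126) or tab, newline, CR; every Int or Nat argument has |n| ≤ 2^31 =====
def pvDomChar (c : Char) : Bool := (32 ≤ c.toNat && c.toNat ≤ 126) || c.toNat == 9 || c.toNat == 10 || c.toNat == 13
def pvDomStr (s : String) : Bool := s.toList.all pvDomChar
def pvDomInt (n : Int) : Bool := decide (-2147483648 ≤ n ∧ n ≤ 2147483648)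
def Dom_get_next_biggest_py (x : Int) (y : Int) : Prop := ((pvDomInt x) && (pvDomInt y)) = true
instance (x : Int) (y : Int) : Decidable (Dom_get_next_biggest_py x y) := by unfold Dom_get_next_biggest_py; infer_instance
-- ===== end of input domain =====

-- B replaces A's two doubling while-loops with a closed-form bit-length formula per dimension (alternative decomposition, not claimed faster).

-- ===== PORT A =====
-- the 'while nw < v: nw *= 2' loop of A; nw starts at 16 and stays positive (0 < nw carried for termination)
def pvGrowA (v : Int) (nw : Nat) (h : 0 < nw) : Nat :=
  if (nw : Int) < v then pvGrowA v (nw * 2) (by omega) else nw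
termination_by (v - nw).toNat
decreasing_by omega

def get_next_biggest_py (x : Int) (y : Int) : Int × Int :=
  if x = y ∧ y = 1 then (x, y)
  else ((pvGrowA x 16 (by norm_num) : Int), (pvGrowA y 16 (by norm_num) : Int))

-- ===== PORT B =====
-- Python's n.bit_length() for n ≥ 1 is Nat.log2 n + 1 (only called with v - 1 ≥ 16 here); 1 << k = 2^k
def pvPot (v : Int) : Int :=
  if v ≤ 16 then 16 else (2 : Int) ^ ((v - 1).toNat.log2 + 1)

def get_next_biggest_py_alt (x : Int) (y : Int) : Int × Int :=
  if x = y ∧ y = 1 then (x, y) else (pvPot x, pvPot y)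

-- ===== PRECONDITION & SPEC =====
def Spec_get_next_biggest_py (x : Int) (y : Int) (out : Int × Int) : Prop := out = get_next_biggest_py_alt x y
instance (x : Int) (y : Int) (out : Int × Int) : Decidable (Spec_get_next_biggest_py x y out) := by unfold Spec_get_next_biggest_py; infer_instance

-- ===== CLAIM (what is proved, stated in full; the proofs are below) =====
def Claim_equal_get_next_biggest_py : Prop := ∀ (x : Int) (y : Int), Dom_get_next_biggest_py x y → Spec_get_next_biggest_py x y (get_next_biggest_py x y)

-- ===== LEMMAS AND PROOFS =====

-- loop characterization: starting from nw = 2^m (m ≥ 4), A's loop returns nw if v ≤ nw, else 2^(log2(v-1)+1)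
lemma pvGrowA_eq : ∀ (n : Nat) (v : Int) (m : Nat), 4 ≤ m → (v - (2 : Int) ^ m).toNat ≤ n →
    (pvGrowA v (2 ^ m) (by positivity) : Int) =
      if v ≤ (2 : Int) ^ m then (2 : Int) ^ m else 2 ^ ((v - 1).toNat.log2 + 1) := by
  intro n
  induction n with
  | zero =>
    intro v m _ h
    have hcm : ((2 ^ m : Nat) : Int) = 2 ^ m := by push_cast; ring
    rw [pvGrowA]
    have hnw : ¬ ((2 ^ m : Nat) : Int) < v := by rw [hcm]; omega
    rw [if_neg hnw, if_pos (by rw [hcm] at hnw; omega), hcm]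
  | succ n ih =>
    intro v m hm h
    have hcm : ((2 ^ m : Nat) : Int) = 2 ^ m := by push_cast; ring
    have hcm1 : ((2 ^ (m + 1) : Nat) : Int) = 2 ^ (m + 1) := by push_cast; ring
    have e1 : (2 : Int) ^ (m + 1) = 2 * 2 ^ m := by ring
    have e2 : (16 : Int) ≤ 2 ^ m := by
      calc (16 : Int) = 2 ^ 4 := by norm_num
        _ ≤ 2 ^ m := pow_le_pow_right₀ (by norm_num) hm
    rw [pvGrowA]
    by_cases hlt : ((2 ^ m : Nat) : Int) < v
    · rw [if_pos hlt]
      rw [hcm] at hlt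
      have hrw : pvGrowA v (2 ^ m * 2) (by positivity) = pvGrowA v (2 ^ (m + 1)) (by positivity) := by
        congr 1
      rw [hrw, ih v (m + 1) (by omega) (by omega),
        if_neg (show ¬ v ≤ (2 : Int) ^ m by omega)]
      by_cases hle : v ≤ (2 : Int) ^ (m + 1)
      · rw [if_pos hle]
        have hlog : (v - 1).toNat.log2 = m := by
          rw [Nat.log2_eq_log_two]
          apply Nat.log_eq_of_pow_le_of_lt_pow
          · omega
          · omega
        rw [hlog]
      · rw [if_neg hle]
    · rw [if_neg hlt, hcm] at *
      rw [if_pos (by omega)]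

lemma pvGrowA_eq_pot (v : Int) : (pvGrowA v 16 (by norm_num) : Int) = pvPot v := by
  have h := pvGrowA_eq (v - 16).toNat v 4 (le_refl 4) (by norm_num)
  have hrw : pvGrowA v (2 ^ 4) (by positivity) = pvGrowA v 16 (by norm_num) := by
    congr 1
  rw [hrw] at h
  rw [h, pvPot]
  norm_num

-- ===== VERDICT (by name: the statement is the Claim_ definition above) =====
theorem get_next_biggest_py_spec : Claim_equal_get_next_biggest_py := by
  intro x y _
  unfold Spec_get_next_biggest_py get_next_biggest_py get_next_biggest_py_alt
  by_cases h : x = y ∧ y = 1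
  · simp [h]
  · simp only [h, if_neg, not_false_iff]
    rw [pvGrowA_eq_pot, pvGrowA_eq_pot]
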